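-- pv_equiv track=rewrite | github.com/OpenEPaperLink/Home_Assistant_Integration | custom_components/open_epaper_link/imagegen/shapes.py | get_rounded_corners
-- ===== SOURCE A (Python) =====
-- def get_rounded_corners(corner_string: str) -> tuple[bool, bool, bool, bool]:
--     """Get rounded corner configuration.
--
--     Parses a string specifying which corners of a rectangle should be rounded.
--
--     Args:
--         corner_string: String specifying corners to round ("all" or comma-separated list)
--
--     Returns:
--         tuple: Boolean flags for (top_left, top_right, bottom_right, bottom_left)
--     """
--     if corner_string == "all":
--         return True, True, True, True
--
--     corners = corner_string.split(",")
--     corner_map = {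
--         "top_left": 0,
--         "top_right": 1,
--         "bottom_right": 2,
--         "bottom_left": 3
--     }
--
--     result = [False] * 4
--     for corner in corners:
--         corner = corner.strip()
--         if corner in corner_map:
--             result[corner_map[corner]] = True
--
--     return result[0], result[1], result[2], result[3]
-- ===== SOURCE B (Python) =====
-- def get_rounded_corners(corner_string: str) -> tuple[bool, bool, bool, bool]:
--     """Get rounded corner configuration (gather formulation)."""
--     if corner_string == "all":
--         tokens = {"top_left", "top_right", "bottom_right", "bottom_left"}
--     else:
--         tokens = {part.strip() for part in corner_string.split(",")}
--     return ("top_left" in tokens, "top_right" in tokens,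
--             "bottom_right" in tokens, "bottom_left" in tokens)
-- ===== Notes on version B (the rewrite author's own statement) =====
-- stated objective: simpler
-- what changed: B replaces A's scatter loop (dict index map plus a mutable 4-slot result list updated per token) with a gather formulation: build the set of stripped tokens once and answer each of the four flags by a membership test.
import Mathlib
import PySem

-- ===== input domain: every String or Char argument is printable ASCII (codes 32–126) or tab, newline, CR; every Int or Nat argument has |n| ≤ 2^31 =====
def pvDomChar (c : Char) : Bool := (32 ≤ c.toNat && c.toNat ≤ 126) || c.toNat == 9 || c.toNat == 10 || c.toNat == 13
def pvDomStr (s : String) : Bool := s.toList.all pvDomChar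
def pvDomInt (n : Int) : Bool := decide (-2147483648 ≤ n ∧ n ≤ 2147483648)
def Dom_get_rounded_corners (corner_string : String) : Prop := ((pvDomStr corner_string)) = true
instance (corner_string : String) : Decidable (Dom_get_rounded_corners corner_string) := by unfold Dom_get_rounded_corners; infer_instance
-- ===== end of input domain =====

-- B replaces A's scatter loop (dict index map + mutable 4-slot result list) with a
-- gather formulation: build the set of stripped tokens once, then answer each flag
-- by a membership test (objective: simpler).


-- ===== PORT A =====
-- the literal dict 'corner_map' of A
def pvCornerMap : PySem.Dict String Int :=
  PySem.Dict.ofList [("top_left", 0), ("top_right", 1), ("bottom_right", 2), ("bottom_left", 3)]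

def get_rounded_corners (corner_string : String) : Bool × Bool × Bool × Bool :=
  if corner_string == "all" then (true, true, true, true)
  else
    let corners := (PySem.Str.split? corner_string ",").getD []
    let result := corners.foldl (fun result corner =>
      let c := PySem.Str.strip corner
      if pvCornerMap.contains c then
        PySem.List.pySetD result (pvCornerMap.getD c 0) true
      else result) [false, false, false, false]
    (PySem.List.pyGetD result 0 false, PySem.List.pyGetD result 1 false,
     PySem.List.pyGetD result 2 false, PySem.List.pyGetD result 3 false)

-- ===== PORT B =====
def get_rounded_corners_alt (corner_string : String) : Bool × Bool × Bool × Bool :=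
  let tokens : PySem.Set String :=
    if corner_string == "all" then
      PySem.Set.ofList ["top_left", "top_right", "bottom_right", "bottom_left"]
    else
      PySem.Set.ofList (((PySem.Str.split? corner_string ",").getD []).map PySem.Str.strip)
  (PySem.Set.contains tokens "top_left", PySem.Set.contains tokens "top_right",
   PySem.Set.contains tokens "bottom_right", PySem.Set.contains tokens "bottom_left")

-- ===== PRECONDITION & SPEC =====
def Spec_get_rounded_corners (corner_string : String) (out : Bool × Bool × Bool × Bool) : Prop := out = get_rounded_corners_alt corner_string
instance (corner_string : String) (out : Bool × Bool × Bool × Bool) : Decidable (Spec_get_rounded_corners corner_string out) := by unfold Spec_get_rounded_corners; infer_instance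

-- ===== CLAIM (what is proved, stated in full; the proofs are below) =====
def Claim_equal_get_rounded_corners : Prop := ∀ (corner_string : String), Dom_get_rounded_corners corner_string → Spec_get_rounded_corners corner_string (get_rounded_corners corner_string)

-- ===== LEMMAS AND PROOFS =====

lemma pvCornerMap_eq : pvCornerMap =
    PySem.Dict.mk [("top_left", 0), ("top_right", 1), ("bottom_right", 2), ("bottom_left", 3)] := by
  decide

-- evaluating A's loop step on one token, per case of the stripped token
lemma pvStep_eval (r0 r1 r2 r3 : Bool) (x : String) :
    (let c := PySem.Str.strip x
     if pvCornerMap.contains c then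
       PySem.List.pySetD [r0, r1, r2, r3] (pvCornerMap.getD c 0) true
     else [r0, r1, r2, r3])
    = [r0 || (PySem.Str.strip x == "top_left"), r1 || (PySem.Str.strip x == "top_right"),
       r2 || (PySem.Str.strip x == "bottom_right"), r3 || (PySem.Str.strip x == "bottom_left")] := by
  by_cases h1 : PySem.Str.strip x = "top_left"
  · simp [h1, pvCornerMap_eq, PySem.Dict.contains, PySem.Dict.getD, PySem.Dict.get?_mk_cons,
      PySem.List.pySetD, PySem.List.pySet?, PySem.List.pyIdx?]
  by_cases h2 : PySem.Str.strip x = "top_right"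
  · simp [h2, pvCornerMap_eq, PySem.Dict.contains, PySem.Dict.getD, PySem.Dict.get?_mk_cons,
      PySem.List.pySetD, PySem.List.pySet?, PySem.List.pyIdx?]
  by_cases h3 : PySem.Str.strip x = "bottom_right"
  · simp [h3, pvCornerMap_eq, PySem.Dict.contains, PySem.Dict.getD, PySem.Dict.get?_mk_cons,
      PySem.List.pySetD, PySem.List.pySet?, PySem.List.pyIdx?]
  by_cases h4 : PySem.Str.strip x = "bottom_left"
  · simp [h4, pvCornerMap_eq, PySem.Dict.contains, PySem.Dict.getD, PySem.Dict.get?_mk_cons,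
      PySem.List.pySetD, PySem.List.pySet?, PySem.List.pyIdx?]
  · simp [pvCornerMap_eq, PySem.Dict.contains,
      Ne.symm h1, Ne.symm h2, Ne.symm h3, Ne.symm h4, h1, h2, h3, h4]

-- A's scatter loop, characterised component-wise as four 'any' scans.
lemma pvLoop_char (l : List String) (a b c d : Bool) :
    l.foldl (fun result corner =>
      let c := PySem.Str.strip corner
      if pvCornerMap.contains c then
        PySem.List.pySetD result (pvCornerMap.getD c 0) true
      else result) [a, b, c, d]
    = [a || l.any (fun s => PySem.Str.strip s == "top_left"),
       b || l.any (fun s => PySem.Str.strip s == "top_right"),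
       c || l.any (fun s => PySem.Str.strip s == "bottom_right"),
       d || l.any (fun s => PySem.Str.strip s == "bottom_left")] := by
  induction l generalizing a b c d with
  | nil => simp
  | cons h t ih =>
    rw [List.foldl_cons, pvStep_eval, ih]
    simp [Bool.or_assoc]

-- membership in set(map(strip, l)) is an 'any' scan over l
lemma pvSetContains_map (l : List String) (n : String) :
    PySem.Set.contains (PySem.Set.ofList (l.map PySem.Str.strip)) n
      = l.any (fun s => PySem.Str.strip s == n) := by
  rw [Bool.eq_iff_iff]
  rw [PySem.Set.contains_iff]
  rw [PySem.Set.mem_ofList]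
  simp only [List.mem_map, List.any_eq_true, beq_iff_eq]

-- ===== VERDICT (by name: the statement is the Claim_ definition above) =====
theorem get_rounded_corners_spec : Claim_equal_get_rounded_corners := by
  intro s _
  unfold Spec_get_rounded_corners get_rounded_corners get_rounded_corners_alt
  by_cases hall : s == "all"
  · simp only [hall, if_pos]
    decide
  · simp only [hall, Bool.false_eq_true, if_false]
    rw [pvLoop_char, pvSetContains_map, pvSetContains_map, pvSetContains_map, pvSetContains_map]
    rfl
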